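-- pv_equiv track=rewrite | github.com/vmarquar/advent_of_code_2023 | day04.py | apply_point_logic
-- ===== SOURCE A (Python) =====
-- from typing import List
--
-- def apply_point_logic(owned_winning_numbers: List[int]) -> int:
--     """
--     # 3) apply point logic to this numbers
--     # 1 won -> 1 point
--     # 2 wons -> 2 points
--     # 4 wons -> 8 points
--     # 1: 1*2 = 2
--     # 2: 2*2 = 4
--     # 3: 4*2 = 8
--     # apply point logic
--     """
--     points = 0
--     for i, won in enumerate(owned_winning_numbers):
--         if(i == 0):
--             points = 1
--         else:
--             points = points * 2
--     return(points)
-- ===== SOURCE B (Python) =====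
-- from typing import List
--
-- def apply_point_logic(owned_winning_numbers: List[int]) -> int:
--     n = len(owned_winning_numbers)
--     return 0 if n == 0 else 2 ** (n - 1)
-- ===== Notes on version B (the rewrite author's own statement) =====
-- stated objective: simpler
-- what changed: Replaced the enumerate loop with an accumulator by the closed form 0 if empty else 2**(len-1), read off the list length.
import Mathlib
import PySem

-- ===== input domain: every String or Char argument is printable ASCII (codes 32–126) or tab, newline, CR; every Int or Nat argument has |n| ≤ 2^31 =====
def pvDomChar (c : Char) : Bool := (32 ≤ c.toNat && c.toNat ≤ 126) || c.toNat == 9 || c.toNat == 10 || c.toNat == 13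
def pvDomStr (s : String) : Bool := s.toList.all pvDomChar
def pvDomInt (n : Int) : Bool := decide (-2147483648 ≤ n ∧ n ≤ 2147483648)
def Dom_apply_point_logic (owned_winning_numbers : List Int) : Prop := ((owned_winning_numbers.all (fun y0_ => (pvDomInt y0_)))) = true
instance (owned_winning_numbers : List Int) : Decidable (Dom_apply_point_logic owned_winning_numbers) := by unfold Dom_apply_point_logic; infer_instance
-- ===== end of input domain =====

-- B replaces A's enumerate loop by the closed form 0 / 2^(len-1); return value only, no side effects.

-- ===== PORT A =====
-- points = 0; for i, won in enumerate(...): points = 1 if i == 0 else points * 2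
def apply_point_logic (owned_winning_numbers : List Int) : Int :=
  (PySem.List.enumerate owned_winning_numbers).foldl
    (fun points iw => if iw.1 == 0 then 1 else points * 2) 0

-- ===== PORT B =====
-- 0 if n == 0 else 2 ** (n - 1)
def apply_point_logic_alt (owned_winning_numbers : List Int) : Int :=
  if owned_winning_numbers.length == 0 then 0
  else (2 : Int) ^ (owned_winning_numbers.length - 1)

-- ===== PRECONDITION & SPEC =====
def Spec_apply_point_logic (owned_winning_numbers : List Int) (out : Int) : Prop := out = apply_point_logic_alt owned_winning_numbers
instance (owned_winning_numbers : List Int) (out : Int) : Decidable (Spec_apply_point_logic owned_winning_numbers out) := by unfold Spec_apply_point_logic; infer_instance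

-- ===== CLAIM (what is proved, stated in full; the proofs are below) =====
def Claim_equal_apply_point_logic : Prop := ∀ (owned_winning_numbers : List Int), Dom_apply_point_logic owned_winning_numbers → Spec_apply_point_logic owned_winning_numbers (apply_point_logic owned_winning_numbers)

-- ===== LEMMAS AND PROOFS =====

-- After the first element (index 0), every step just doubles the accumulator.
theorem pv_fold_doubles (xs : List Int) (s : Int) (hs : 1 ≤ s) (acc : Int) :
    (PySem.List.enumerate xs s).foldl
      (fun points iw => if iw.1 == 0 then 1 else points * 2) acc
      = acc * 2 ^ xs.length := by
  induction xs generalizing s acc with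
  | nil => simp [PySem.List.enumerate_nil]
  | cons x xs ih =>
      have hne : (s == 0) = false := by
        simp only [beq_eq_false_iff_ne]; omega
      rw [PySem.List.enumerate_cons]
      simp only [List.foldl_cons, hne]
      rw [ih (s + 1) (by omega)]
      simp [List.length_cons, pow_succ]
      ring

theorem apply_point_logic_spec : Claim_equal_apply_point_logic := by
  intro l _
  unfold Spec_apply_point_logic apply_point_logic apply_point_logic_alt
  cases l with
  | nil => simp [PySem.List.enumerate_nil]
  | cons x xs =>
      rw [PySem.List.enumerate_cons]
      simp only [List.foldl_cons, if_pos (by decide : ((0 : Int) == 0) = true)]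
      rw [pv_fold_doubles xs (0+1) (by omega) 1]
      simp
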